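-- pv_equiv track=rewrite | github.com/Baleeg-Alhilali/Bioe201Group3 | easy_to_run/EX44easier_to_run.py | overlap_alignment
-- ===== SOURCE A (Python) =====
-- def overlap_alignment (sequence_1, sequence_2):
--     sequence_1='-'+sequence_1 #also known as v, -to create space for potential gaps
--     sequence_2='-'+sequence_2 #also known as w
--
--     score_matrix=[[0 for j in range(len(sequence_2))] for i in range(len(sequence_1))] #at the whole length of string 1 we have 0 for j
--     backtrack_matrix=[[None for j in range(len(sequence_2))] for i in range(len(sequence_1))] #at the whole length of string 1 we have no direction for j
--
--     #penalty is 1 if we have a match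
--     #penalty is -2 if we have an mismatch/indel
--
--     for j in range(1, len(sequence_2)):
--         score_matrix[0][j]=score_matrix[0][j-1]-2 #applying the penalty 2 at point(0,j-1)
--         backtrack_matrix[0][j]='left' #the direction is left between (i,j-1) and (i,j)
--
--     for i in range(1,len(sequence_1)): #comparing between both strings here
--         for j in range(1, len(sequence_2)):
--             #scoring_matrix cases
--             case_1=score_matrix[i-1][j-1]+(1 if sequence_1[i]==sequence_2[j] else -2) #our case is looking for a match, we add 1 if we find it and we subtract 2 if we don't (penalties)
--             case_2=score_matrix[i-1][j] -2 #applying the penalty -2 if we have an indel at (i-1,j)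
--             case_3=score_matrix[i][j-1] -2 #applying the penalty -2 if we have an indel at (i,j-1)
--
--             #back_track matrix cases
--             score_matrix[i][j]=max(case_1,case_2,case_3) #highest score
--             if score_matrix[i][j]==case_1:
--                 backtrack_matrix[i][j]='diagonal' #if both sequences are equal we go diagonaly
--
--             elif score_matrix[i][j]==case_2:
--                 backtrack_matrix[i][j]='upwards'#the direction is upwards between (i,j-1) and (i,j)
--
--             elif score_matrix[i][j]==case_3:
--                 backtrack_matrix[i][j]='left'   #the direction is left between (i,j-1) and (i,j)
--
--
--     i=len(sequence_1)-1 #the whole sequence, -1 as the last point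
--     j=max(range(len(sequence_2)), key=lambda x:score_matrix[i][x]) #key is used to determine the maximum value in the range, based on score_matrix[i][j]
--     #j represents the index where the maximum value in score_matrix[i][j] is found
--     maximum_score=score_matrix[i][j]
--
--     #back_track
--
--     alignment_case1=''
--     alignment_case2=''
--     while backtrack_matrix[i][j] is not None:
--         direction=backtrack_matrix[i][j]
--         if direction=='diagonal': #the case where we have a match
--             alignment_case1=sequence_1[i]+ alignment_case1
--             alignment_case2=sequence_2[j]+ alignment_case2
--             i-=1
--             j-=1
--
--         elif direction=='upwards': #the case where we have an indel(specifically a deletion)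
--             alignment_case1=sequence_1[i]+ alignment_case1
--             alignment_case2='-'+ alignment_case2
--             i-=1
--
--         elif direction=='left':#the case where we have an indel(specifically an insertion)
--             alignment_case1='-'+ alignment_case1
--             alignment_case2=sequence_2[j]+ alignment_case2
--             j-=1
--
--
--     return maximum_score,alignment_case1,alignment_case2
-- ===== SOURCE B (Python) =====
-- def overlap_alignment(sequence_1, sequence_2):
--     # Path-carrying rolling-row DP: each cell keeps (score, chain), where chain is a
--     # shared cons-list of aligned character pairs back to the path's start. No score
--     # matrix, no backtrack matrix and no traceback over indices are ever built: the
--     # answer is read off the chain stored in the chosen last-row cell.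
--     v = '-' + sequence_1
--     w = '-' + sequence_2
--     row = [(0, None)]
--     for j in range(1, len(w)):
--         row.append((row[j - 1][0] - 2, ('-', w[j], row[j - 1][1])))
--     for i in range(1, len(v)):
--         new = [(0, None)]
--         for j in range(1, len(w)):
--             diag = row[j - 1][0] + (1 if v[i] == w[j] else -2)
--             up = row[j][0] - 2
--             left = new[j - 1][0] - 2
--             s = max(diag, up, left)
--             if s == diag:
--                 node = (v[i], w[j], row[j - 1][1])
--             elif s == up:
--                 node = (v[i], '-', row[j][1])
--             else:
--                 node = ('-', w[j], new[j - 1][1])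
--             new.append((s, node))
--         row = new
--     best = 0
--     for j in range(1, len(w)):
--         if row[j][0] > row[best][0]:
--             best = j
--     score, node = row[best]
--     rev1 = []
--     rev2 = []
--     while node is not None:
--         c1, c2, node = node
--         rev1.append(c1)
--         rev2.append(c2)
--     return score, ''.join(reversed(rev1)), ''.join(reversed(rev2))
-- ===== Notes on version B (the rewrite author's own statement) =====
-- stated objective: alternative
-- what changed: B replaces A's two full matrices plus index-walking traceback by a path-carrying rolling-row DP: each cell of the current row stores (score, shared cons-chain of aligned character pairs back to the path start), so no score matrix or backtrack matrix is kept and no traceback over the matrix is performed - the answer is read off the chain stored in the chosen last-row cell.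
import Mathlib
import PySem

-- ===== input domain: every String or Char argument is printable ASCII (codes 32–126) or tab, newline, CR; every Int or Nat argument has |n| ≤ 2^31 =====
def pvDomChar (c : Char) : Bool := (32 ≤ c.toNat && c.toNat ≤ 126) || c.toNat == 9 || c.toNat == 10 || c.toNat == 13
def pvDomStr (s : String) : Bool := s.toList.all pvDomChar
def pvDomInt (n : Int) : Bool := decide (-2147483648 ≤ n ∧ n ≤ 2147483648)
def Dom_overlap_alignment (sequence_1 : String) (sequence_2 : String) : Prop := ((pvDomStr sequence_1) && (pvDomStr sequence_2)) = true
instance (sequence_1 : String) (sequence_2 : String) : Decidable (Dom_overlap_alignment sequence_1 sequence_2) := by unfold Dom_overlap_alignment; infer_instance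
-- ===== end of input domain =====

-- B replaces A's two matrices and index traceback by a path-carrying rolling-row DP: each
-- cell holds (score, chain of aligned pairs back to the path start); the answer is read
-- off the chosen last-row cell's chain. Same return value.

-- Shared low-level matrix primitives (Python `M[i][j]` read / `M[i][j] = x` write; every
-- index at a use site is provably a nonnegative in-range index, so Nat getD/set is exact).
def pvGet2 {α : Type} (M : List (List α)) (d : α) (i j : Nat) : α := (M.getD i []).getD j d
def pvSet2 {α : Type} (M : List (List α)) (i j : Nat) (x : α) : List (List α) := M.set i ((M.getD i []).set j x)

-- ===== PORT A =====
-- the two initialization loops and the nested fill loop, updating (score_matrix, backtrack_matrix)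
def pvA_matrices (v w : List Char) : List (List Int) × List (List (Option String)) :=
  let score0 : List (List Int) := (List.range v.length).map (fun _ => (List.range w.length).map (fun _ => (0 : Int)))
  let bt0 : List (List (Option String)) := (List.range v.length).map (fun _ => (List.range w.length).map (fun _ => (none : Option String)))
  -- for j in range(1, len(sequence_2)):  (range(1, m) = List.range' 1 (m-1); m ≥ 1 always)
  let st1 := (List.range' 1 (w.length - 1)).foldl
    (fun (st : List (List Int) × List (List (Option String))) j =>
      (pvSet2 st.1 0 j (pvGet2 st.1 0 0 (j - 1) - 2), pvSet2 st.2 0 j (some "left"))) (score0, bt0)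
  -- for i in range(1, len(sequence_1)): for j in range(1, len(sequence_2)):
  (List.range' 1 (v.length - 1)).foldl
    (fun st i =>
      (List.range' 1 (w.length - 1)).foldl
        (fun (st : List (List Int) × List (List (Option String))) j =>
          let case1 := pvGet2 st.1 0 (i - 1) (j - 1) + (if v.getD i ' ' = w.getD j ' ' then (1 : Int) else -2)
          let case2 := pvGet2 st.1 0 (i - 1) j - 2
          let case3 := pvGet2 st.1 0 i (j - 1) - 2
          let best := max (max case1 case2) case3     -- max(case_1, case_2, case_3)
          (pvSet2 st.1 i j best,
            if best = case1 then pvSet2 st.2 i j (some "diagonal")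
            else if best = case2 then pvSet2 st.2 i j (some "upwards")
            else if best = case3 then pvSet2 st.2 i j (some "left")
            else st.2)) st) st1

-- the `while backtrack_matrix[i][j] is not None` loop; fuel-based recursion (the caller
-- passes fuel ≥ i+j, which bounds the iteration count since every stored direction
-- decreases i+j; a stored string other than the three directions would make the Python
-- loop spin forever, which never happens, so that branch returns the current state)
def pvA_loop (bt : List (List (Option String))) (v w : List Char) :
    Nat → Nat → Nat → List Char → List Char → List Char × List Char
  | 0, _, _, a1, a2 => (a1, a2)
  | fuel + 1, i, j, a1, a2 =>
    match pvGet2 bt none i j with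
    | none => (a1, a2)
    | some d =>
      if d = "diagonal" then pvA_loop bt v w fuel (i - 1) (j - 1) (v.getD i ' ' :: a1) (w.getD j ' ' :: a2)
      else if d = "upwards" then pvA_loop bt v w fuel (i - 1) j (v.getD i ' ' :: a1) ('-' :: a2)
      else if d = "left" then pvA_loop bt v w fuel i (j - 1) ('-' :: a1) (w.getD j ' ' :: a2)
      else (a1, a2)

def overlap_alignment (sequence_1 : String) (sequence_2 : String) : Int × String × String :=
  let v : List Char := '-' :: sequence_1.toList       -- sequence_1 = '-' + sequence_1
  let w : List Char := '-' :: sequence_2.toList       -- sequence_2 = '-' + sequence_2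
  let st := pvA_matrices v w
  let i0 := v.length - 1
  -- j = max(range(len(sequence_2)), key=lambda x: score_matrix[i][x])  (first maximal index)
  let j0 := (PySem.List.max? (List.range w.length) (fun x => pvGet2 st.1 0 i0 x)).getD 0
  let maximum_score := pvGet2 st.1 0 i0 j0
  let res := pvA_loop st.2 v w (v.length + w.length) i0 j0 [] []
  (maximum_score, String.ofList res.1, String.ofList res.2)

-- ===== PORT B =====
-- Python's chain node (c1, c2, parent) / None becomes an explicit cons-list of pairs
inductive PvChain : Type
  | nil : PvChain
  | cons : Char → Char → PvChain → PvChain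
deriving DecidableEq, Repr

-- one inner-loop step: `new.append((s, node))` with s = max(diag, up, left) and node
-- chosen with the same if/elif/else priority as the Python
def pvBStep (v w : List Char) (row : List (Int × PvChain)) (i : Nat)
    (new : List (Int × PvChain)) (j : Nat) : List (Int × PvChain) :=
  new ++ [(max (max ((row.getD (j - 1) (0, PvChain.nil)).1 + (if v.getD i ' ' = w.getD j ' ' then (1 : Int) else -2)) ((row.getD j (0, PvChain.nil)).1 - 2)) ((new.getD (j - 1) (0, PvChain.nil)).1 - 2),
    if max (max ((row.getD (j - 1) (0, PvChain.nil)).1 + (if v.getD i ' ' = w.getD j ' ' then (1 : Int) else -2)) ((row.getD j (0, PvChain.nil)).1 - 2)) ((new.getD (j - 1) (0, PvChain.nil)).1 - 2) = (row.getD (j - 1) (0, PvChain.nil)).1 + (if v.getD i ' ' = w.getD j ' ' then (1 : Int) else -2) then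
      PvChain.cons (v.getD i ' ') (w.getD j ' ') (row.getD (j - 1) (0, PvChain.nil)).2
    else if max (max ((row.getD (j - 1) (0, PvChain.nil)).1 + (if v.getD i ' ' = w.getD j ' ' then (1 : Int) else -2)) ((row.getD j (0, PvChain.nil)).1 - 2)) ((new.getD (j - 1) (0, PvChain.nil)).1 - 2) = (row.getD j (0, PvChain.nil)).1 - 2 then
      PvChain.cons (v.getD i ' ') '-' (row.getD j (0, PvChain.nil)).2
    else
      PvChain.cons '-' (w.getD j ' ') (new.getD (j - 1) (0, PvChain.nil)).2)]

-- `row = [(0, None)]; for j in range(1, len(w)): row.append(...)`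
def pvB_row0 (w : List Char) : List (Int × PvChain) :=
  (List.range' 1 (w.length - 1)).foldl
    (fun row j => row ++ [((row.getD (j - 1) (0, PvChain.nil)).1 - 2,
      PvChain.cons '-' (w.getD j ' ') (row.getD (j - 1) (0, PvChain.nil)).2)])
    [(0, PvChain.nil)]

-- the outer loop: replace `row` by the freshly built `new`
def pvB_fill (v w : List Char) : List (Int × PvChain) :=
  (List.range' 1 (v.length - 1)).foldl
    (fun row i => (List.range' 1 (w.length - 1)).foldl (pvBStep v w row i) [(0, PvChain.nil)])
    (pvB_row0 w)

-- `best = 0; for j in range(1, len(w)): if row[j][0] > row[best][0]: best = j`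
def pvB_best (row : List (Int × PvChain)) (m : Nat) : Nat :=
  (List.range' 1 (m - 1)).foldl
    (fun best j => if (row.getD j (0, PvChain.nil)).1 > (row.getD best (0, PvChain.nil)).1 then j else best) 0

-- `while node is not None: c1, c2, node = node; rev1.append(c1); rev2.append(c2)`
def pvB_unwind : PvChain → List Char → List Char → List Char × List Char
  | PvChain.nil, r1, r2 => (r1, r2)
  | PvChain.cons c1 c2 p, r1, r2 => pvB_unwind p (r1 ++ [c1]) (r2 ++ [c2])

def overlap_alignment_alt (sequence_1 : String) (sequence_2 : String) : Int × String × String :=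
  let v : List Char := '-' :: sequence_1.toList
  let w : List Char := '-' :: sequence_2.toList
  let row := pvB_fill v w
  let best := pvB_best row w.length
  let cell := row.getD best (0, PvChain.nil)
  let res := pvB_unwind cell.2 [] []
  (cell.1, String.ofList res.1.reverse, String.ofList res.2.reverse)

-- ===== PRECONDITION & SPEC =====
def Spec_overlap_alignment (sequence_1 : String) (sequence_2 : String) (out : Int × String × String) : Prop := out = overlap_alignment_alt sequence_1 sequence_2
instance (sequence_1 : String) (sequence_2 : String) (out : Int × String × String) : Decidable (Spec_overlap_alignment sequence_1 sequence_2 out) := by unfold Spec_overlap_alignment; infer_instance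

-- ===== CLAIM (what is proved, stated in full; the proofs are below) =====
def Claim_equal_overlap_alignment : Prop := ∀ (sequence_1 : String) (sequence_2 : String), Dom_overlap_alignment sequence_1 sequence_2 → Spec_overlap_alignment sequence_1 sequence_2 (overlap_alignment sequence_1 sequence_2)

-- ===== LEMMAS AND PROOFS =====

-- matrix get/set facts
theorem pv_length_set2 {α : Type} (M : List (List α)) (i j : Nat) (x : α) :
    (pvSet2 M i j x).length = M.length := by simp [pvSet2]

theorem pv_row_set2_ne {α : Type} (M : List (List α)) (i j : Nat) (x : α) (r : Nat) (h : r ≠ i) :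
    (pvSet2 M i j x).getD r [] = M.getD r [] := by
  simp [pvSet2, List.getD_eq_getElem?_getD, List.getElem?_set_ne (Ne.symm h)]

theorem pv_row_set2_self {α : Type} (M : List (List α)) (i j : Nat) (x : α) (hi : i < M.length) :
    (pvSet2 M i j x).getD i [] = (M.getD i []).set j x := by
  simp [pvSet2, List.getD_eq_getElem?_getD, List.getElem?_set_self hi]

theorem pv_get2_set2_self {α : Type} (M : List (List α)) (d : α) (i j : Nat) (x : α)
    (hi : i < M.length) (hj : j < (M.getD i []).length) :
    pvGet2 (pvSet2 M i j x) d i j = x := by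
  rw [pvGet2, pv_row_set2_self M i j x hi]
  simp [List.getD_eq_getElem?_getD, List.getElem?_set_self (by simpa using hj)]

theorem pv_get2_set2_ne {α : Type} (M : List (List α)) (d : α) (i j : Nat) (x : α) (r c : Nat)
    (h : r ≠ i ∨ c ≠ j) :
    pvGet2 (pvSet2 M i j x) d r c = pvGet2 M d r c := by
  rcases eq_or_ne r i with rfl | hr
  · have hc : c ≠ j := h.resolve_left (by simp)
    by_cases hi : r < M.length
    · rw [pvGet2, pv_row_set2_self M r j x hi, pvGet2]
      simp [List.getD_eq_getElem?_getD, List.getElem?_set_ne (Ne.symm hc)]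
    · rw [pvGet2, pvGet2, pvSet2, List.set_eq_of_length_le (by omega)]
  · rw [pvGet2, pv_row_set2_ne M i j x r hr, pvGet2]

-- shape of an n × m matrix
def pvShape {α : Type} (M : List (List α)) (n m : Nat) : Prop :=
  M.length = n ∧ ∀ r, r < n → (M.getD r []).length = m

theorem pv_shape_set2 {α : Type} (M : List (List α)) (i j : Nat) (x : α) (n m : Nat)
    (hS : pvShape M n m) : pvShape (pvSet2 M i j x) n m := by
  obtain ⟨hlen, hrow⟩ := hS
  refine ⟨by simp [pv_length_set2, hlen], fun r hr => ?_⟩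
  rcases eq_or_ne r i with rfl | hne
  · rw [pv_row_set2_self M r j x (by omega)]
    simpa using hrow r hr
  · rw [pv_row_set2_ne M i j x r hne]; exact hrow r hr

theorem pv_shape_const {α : Type} (n m : Nat) (x : α) :
    pvShape ((List.range n).map (fun _ => (List.range m).map (fun _ => x))) n m := by
  refine ⟨by simp, fun r hr => ?_⟩
  simp [List.getD_eq_getElem?_getD, hr]

theorem pv_get2_const {α : Type} (n m : Nat) (x : α) (i j : Nat) :
    pvGet2 ((List.range n).map (fun _ => (List.range m).map (fun _ => x))) x i j = x := by
  unfold pvGet2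
  by_cases hi : i < n
  · by_cases hj : j < m <;> simp [List.getD_eq_getElem?_getD, hi, hj]
  · simp [List.getD_eq_getElem?_getD, hi]

-- the ideal score table S(i,j) (what both versions compute cell by cell)
def pvS (v w : List Char) : Nat → Nat → Int
  | 0, 0 => 0
  | 0, j + 1 => pvS v w 0 j - 2
  | _ + 1, 0 => 0
  | i + 1, j + 1 =>
    max (max (pvS v w i j + (if v.getD (i + 1) ' ' = w.getD (j + 1) ' ' then (1 : Int) else -2))
      (pvS v w i (j + 1) - 2)) (pvS v w (i + 1) j - 2)
  termination_by i j => (i, j)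

theorem pvS_zero (v w : List Char) (i : Nat) : pvS v w i 0 = 0 := by
  cases i <;> simp [pvS]

theorem pvS_row0 (v w : List Char) (j : Nat) (hj : j ≠ 0) : pvS v w 0 j = pvS v w 0 (j - 1) - 2 := by
  obtain ⟨j', rfl⟩ := Nat.exists_eq_succ_of_ne_zero hj
  simp [pvS]

theorem pvS_pos (v w : List Char) (i j : Nat) (hi : i ≠ 0) (hj : j ≠ 0) :
    pvS v w i j =
      max (max (pvS v w (i - 1) (j - 1) + (if v.getD i ' ' = w.getD j ' ' then (1 : Int) else -2))
        (pvS v w (i - 1) j - 2)) (pvS v w i (j - 1) - 2) := by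
  obtain ⟨i', rfl⟩ := Nat.exists_eq_succ_of_ne_zero hi
  obtain ⟨j', rfl⟩ := Nat.exists_eq_succ_of_ne_zero hj
  simp [pvS]

theorem pv_max3 (a b c : Int) : max (max a b) c = a ∨ max (max a b) c = b ∨ max (max a b) c = c := by
  rcases max_choice (max a b) c with h | h
  · rcases max_choice a b with h' | h' <;> rw [h, h'] <;> simp
  · simp [h]

-- the direction A's backtrack matrix stores at (i, j)
def pvDir (v w : List Char) (i j : Nat) : Option String :=
  if j = 0 then none
  else if i = 0 then some "left"
  else
    if pvS v w i j = pvS v w (i - 1) (j - 1) + (if v.getD i ' ' = w.getD j ' ' then (1 : Int) else -2) then some "diagonal"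
    else if pvS v w i j = pvS v w (i - 1) j - 2 then some "upwards"
    else some "left"

-- the ideal path chain stored at (i, j) by B (and traced by A), end-of-alignment first
def pvChainOf (v w : List Char) (i j : Nat) : PvChain :=
  if _hj : j = 0 then PvChain.nil
  else if _hi : i = 0 then PvChain.cons '-' (w.getD j ' ') (pvChainOf v w 0 (j - 1))
  else
    if pvS v w i j = pvS v w (i - 1) (j - 1) + (if v.getD i ' ' = w.getD j ' ' then (1 : Int) else -2) then
      PvChain.cons (v.getD i ' ') (w.getD j ' ') (pvChainOf v w (i - 1) (j - 1))
    else if pvS v w i j = pvS v w (i - 1) j - 2 then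
      PvChain.cons (v.getD i ' ') '-' (pvChainOf v w (i - 1) j)
    else PvChain.cons '-' (w.getD j ' ') (pvChainOf v w i (j - 1))
  termination_by i + j
  decreasing_by all_goals omega

theorem pvChainOf_j0 (v w : List Char) (i : Nat) : pvChainOf v w i 0 = PvChain.nil := by
  rw [pvChainOf]; simp

theorem pvChainOf_i0 (v w : List Char) (j : Nat) (hj : j ≠ 0) :
    pvChainOf v w 0 j = PvChain.cons '-' (w.getD j ' ') (pvChainOf v w 0 (j - 1)) := by
  rw [pvChainOf]; simp [hj]

theorem pvChainOf_pos (v w : List Char) (i j : Nat) (hi : i ≠ 0) (hj : j ≠ 0) :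
    pvChainOf v w i j =
      if pvS v w i j = pvS v w (i - 1) (j - 1) + (if v.getD i ' ' = w.getD j ' ' then (1 : Int) else -2) then
        PvChain.cons (v.getD i ' ') (w.getD j ' ') (pvChainOf v w (i - 1) (j - 1))
      else if pvS v w i j = pvS v w (i - 1) j - 2 then
        PvChain.cons (v.getD i ' ') '-' (pvChainOf v w (i - 1) j)
      else PvChain.cons '-' (w.getD j ' ') (pvChainOf v w i (j - 1)) := by
  rw [pvChainOf]; simp [hi, hj]

-- the two character tracks of a chain
def pvChain1 : PvChain → List Char
  | PvChain.nil => []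
  | PvChain.cons c _ p => c :: pvChain1 p

def pvChain2 : PvChain → List Char
  | PvChain.nil => []
  | PvChain.cons _ c p => c :: pvChain2 p

-- the traceback path from (i, j), emitted in visit order (end-of-alignment first)
def pvRev (v w : List Char) (i j : Nat) : List Char × List Char :=
  (pvChain1 (pvChainOf v w i j), pvChain2 (pvChainOf v w i j))

theorem pvRev_j0 (v w : List Char) (i : Nat) : pvRev v w i 0 = ([], []) := by
  simp [pvRev, pvChainOf_j0, pvChain1, pvChain2]

theorem pvRev_i0 (v w : List Char) (j : Nat) (hj : j ≠ 0) :
    pvRev v w 0 j = ('-' :: (pvRev v w 0 (j - 1)).1, w.getD j ' ' :: (pvRev v w 0 (j - 1)).2) := by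
  simp [pvRev, pvChainOf_i0 v w j hj, pvChain1, pvChain2]

theorem pvRev_pos (v w : List Char) (i j : Nat) (hi : i ≠ 0) (hj : j ≠ 0) :
    pvRev v w i j =
      if pvS v w i j = pvS v w (i - 1) (j - 1) + (if v.getD i ' ' = w.getD j ' ' then (1 : Int) else -2) then
        (v.getD i ' ' :: (pvRev v w (i - 1) (j - 1)).1, w.getD j ' ' :: (pvRev v w (i - 1) (j - 1)).2)
      else if pvS v w i j = pvS v w (i - 1) j - 2 then
        (v.getD i ' ' :: (pvRev v w (i - 1) j).1, '-' :: (pvRev v w (i - 1) j).2)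
      else
        ('-' :: (pvRev v w i (j - 1)).1, w.getD j ' ' :: (pvRev v w i (j - 1)).2) := by
  rw [pvRev, pvChainOf_pos v w i j hi hj]
  split_ifs <;> simp [pvRev, pvChain1, pvChain2]

-- invariant after the first rDone+1 rows (rows 0..rDone) have been filled
def pvInv (v w : List Char) (sc : List (List Int)) (bt : List (List (Option String))) (rDone : Nat) : Prop :=
  pvShape sc v.length w.length ∧ pvShape bt v.length w.length ∧
  (∀ i j, i < v.length → j < w.length → i ≤ rDone →
    pvGet2 sc 0 i j = pvS v w i j ∧ pvGet2 bt none i j = pvDir v w i j) ∧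
  (∀ i j, i < v.length → j < w.length → rDone < i →
    pvGet2 sc 0 i j = 0 ∧ pvGet2 bt none i j = none)

-- proof-side names for A's three fill loops
def pvInnerStep (v w : List Char) (i : Nat)
    (st : List (List Int) × List (List (Option String))) (j : Nat) :
    List (List Int) × List (List (Option String)) :=
  (pvSet2 st.1 i j (max (max (pvGet2 st.1 0 (i - 1) (j - 1) + (if v.getD i ' ' = w.getD j ' ' then (1 : Int) else -2)) (pvGet2 st.1 0 (i - 1) j - 2)) (pvGet2 st.1 0 i (j - 1) - 2)),
    if max (max (pvGet2 st.1 0 (i - 1) (j - 1) + (if v.getD i ' ' = w.getD j ' ' then (1 : Int) else -2)) (pvGet2 st.1 0 (i - 1) j - 2)) (pvGet2 st.1 0 i (j - 1) - 2) = pvGet2 st.1 0 (i - 1) (j - 1) + (if v.getD i ' ' = w.getD j ' ' then (1 : Int) else -2) then pvSet2 st.2 i j (some "diagonal")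
    else if max (max (pvGet2 st.1 0 (i - 1) (j - 1) + (if v.getD i ' ' = w.getD j ' ' then (1 : Int) else -2)) (pvGet2 st.1 0 (i - 1) j - 2)) (pvGet2 st.1 0 i (j - 1) - 2) = pvGet2 st.1 0 (i - 1) j - 2 then pvSet2 st.2 i j (some "upwards")
    else if max (max (pvGet2 st.1 0 (i - 1) (j - 1) + (if v.getD i ' ' = w.getD j ' ' then (1 : Int) else -2)) (pvGet2 st.1 0 (i - 1) j - 2)) (pvGet2 st.1 0 i (j - 1) - 2) = pvGet2 st.1 0 i (j - 1) - 2 then pvSet2 st.2 i j (some "left")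
    else st.2)

def pvRow0F (v w : List Char) (k : Nat) : List (List Int) × List (List (Option String)) :=
  (List.range' 1 k).foldl
    (fun st j => (pvSet2 st.1 0 j (pvGet2 st.1 0 0 (j - 1) - 2), pvSet2 st.2 0 j (some "left")))
    ((List.range v.length).map (fun _ => (List.range w.length).map (fun _ => (0 : Int))),
     (List.range v.length).map (fun _ => (List.range w.length).map (fun _ => (none : Option String))))

def pvInnerF (v w : List Char) (i : Nat) (st : List (List Int) × List (List (Option String)))
    (k : Nat) : List (List Int) × List (List (Option String)) :=
  (List.range' 1 k).foldl (pvInnerStep v w i) st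

def pvOuterF (v w : List Char) (r : Nat) : List (List Int) × List (List (Option String)) :=
  (List.range' 1 r).foldl (fun st i => pvInnerF v w i st (w.length - 1)) (pvRow0F v w (w.length - 1))

theorem pvA_matrices_eq (v w : List Char) : pvA_matrices v w = pvOuterF v w (v.length - 1) := by
  unfold pvA_matrices pvOuterF pvInnerF pvInnerStep pvRow0F
  rfl

theorem pvRow0F_succ (v w : List Char) (k : Nat) :
    pvRow0F v w (k + 1) =
      (pvSet2 (pvRow0F v w k).1 0 (1 + k) (pvGet2 (pvRow0F v w k).1 0 0 ((1 + k) - 1) - 2),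
       pvSet2 (pvRow0F v w k).2 0 (1 + k) (some "left")) := by
  rw [pvRow0F, pvRow0F, List.range'_1_concat, List.foldl_append]
  rfl

theorem pvInnerF_succ (v w : List Char) (i : Nat) (st : List (List Int) × List (List (Option String))) (k : Nat) :
    pvInnerF v w i st (k + 1) = pvInnerStep v w i (pvInnerF v w i st k) (1 + k) := by
  rw [pvInnerF, pvInnerF, List.range'_1_concat, List.foldl_append]
  rfl

theorem pvOuterF_succ (v w : List Char) (r : Nat) :
    pvOuterF v w (r + 1) = pvInnerF v w (1 + r) (pvOuterF v w r) (w.length - 1) := by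
  rw [pvOuterF, pvOuterF, List.range'_1_concat, List.foldl_append]
  rfl

-- invariant for the row-0 initialization loop after processing columns 1..k
def pvRow0Inv (v w : List Char) (sc : List (List Int)) (bt : List (List (Option String))) (k : Nat) : Prop :=
  pvShape sc v.length w.length ∧ pvShape bt v.length w.length ∧
  (∀ j, j < w.length → j ≤ k → pvGet2 sc 0 0 j = pvS v w 0 j ∧ pvGet2 bt none 0 j = pvDir v w 0 j) ∧
  (∀ j, j < w.length → k < j → pvGet2 sc 0 0 j = 0 ∧ pvGet2 bt none 0 j = none) ∧
  (∀ i j, i < v.length → j < w.length → 1 ≤ i → pvGet2 sc 0 i j = 0 ∧ pvGet2 bt none i j = none)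

theorem pv_row0_fold (v w : List Char) (hv : 0 < v.length) :
    ∀ k, k ≤ w.length - 1 → pvRow0Inv v w (pvRow0F v w k).1 (pvRow0F v w k).2 k := by
  intro k
  induction k with
  | zero =>
    intro _
    refine ⟨pv_shape_const _ _ _, pv_shape_const _ _ _, ?_, ?_, ?_⟩
    · intro j hj hj0
      have : j = 0 := by omega
      subst this
      refine ⟨?_, ?_⟩
      · rw [pvS_zero]; exact pv_get2_const _ _ _ _ _
      · rw [pvDir, if_pos rfl]; exact pv_get2_const _ _ _ _ _
    · intro j hj hjk
      exact ⟨pv_get2_const _ _ _ _ _, pv_get2_const _ _ _ _ _⟩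
    · intro i j hi hj h1
      exact ⟨pv_get2_const _ _ _ _ _, pv_get2_const _ _ _ _ _⟩
  | succ k ih =>
    intro hk
    obtain ⟨hS, hB, hchar, hzero, hrows⟩ := ih (by omega)
    rw [pvRow0F_succ]
    have hkm : k + 1 < w.length := by omega
    have e2 : (1 : Nat) + k = k + 1 := by omega
    rw [e2]
    simp only [Nat.add_sub_cancel]
    have hlen1 : 0 < (pvRow0F v w k).1.length := by rw [hS.1]; omega
    have hlen2 : 0 < (pvRow0F v w k).2.length := by rw [hB.1]; omega
    have hrw1 : k + 1 < ((pvRow0F v w k).1.getD 0 []).length := by rw [hS.2 0 hv]; omega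
    have hrw2 : k + 1 < ((pvRow0F v w k).2.getD 0 []).length := by rw [hB.2 0 hv]; omega
    refine ⟨pv_shape_set2 _ _ _ _ _ _ hS, pv_shape_set2 _ _ _ _ _ _ hB, ?_, ?_, ?_⟩
    · intro j hj hjk1
      rcases eq_or_ne j (k + 1) with rfl | hne
      · refine ⟨?_, ?_⟩
        · rw [pv_get2_set2_self _ _ _ _ _ hlen1 hrw1, (hchar k (by omega) (le_refl k)).1,
            pvS_row0 v w (k + 1) (by omega)]
          simp
        · rw [pv_get2_set2_self _ _ _ _ _ hlen2 hrw2, pvDir, if_neg (by omega), if_pos rfl]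
      · have hjk : j ≤ k := by omega
        rw [pv_get2_set2_ne _ _ _ _ _ _ _ (Or.inr hne), pv_get2_set2_ne _ _ _ _ _ _ _ (Or.inr hne)]
        exact hchar j hj hjk
    · intro j hj hgt
      rw [pv_get2_set2_ne _ _ _ _ _ _ _ (Or.inr (by omega)), pv_get2_set2_ne _ _ _ _ _ _ _ (Or.inr (by omega))]
      exact hzero j hj (by omega)
    · intro i j hi hj h1
      rw [pv_get2_set2_ne _ _ _ _ _ _ _ (Or.inl (by omega)), pv_get2_set2_ne _ _ _ _ _ _ _ (Or.inl (by omega))]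
      exact hrows i j hi hj h1

-- invariant for row i0's inner loop after processing columns 1..k
def pvInnerInv (v w : List Char) (i0 : Nat) (sc : List (List Int)) (bt : List (List (Option String))) (k : Nat) : Prop :=
  pvShape sc v.length w.length ∧ pvShape bt v.length w.length ∧
  (∀ r j, r < v.length → j < w.length → r < i0 →
    pvGet2 sc 0 r j = pvS v w r j ∧ pvGet2 bt none r j = pvDir v w r j) ∧
  (∀ j, j < w.length → j ≤ k →
    pvGet2 sc 0 i0 j = pvS v w i0 j ∧ pvGet2 bt none i0 j = pvDir v w i0 j) ∧
  (∀ j, j < w.length → k < j → pvGet2 sc 0 i0 j = 0 ∧ pvGet2 bt none i0 j = none) ∧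
  (∀ r j, r < v.length → j < w.length → i0 < r → pvGet2 sc 0 r j = 0 ∧ pvGet2 bt none r j = none)

theorem pv_inner_fold (v w : List Char) (i0 : Nat) (hi1 : 1 ≤ i0) (hi2 : i0 < v.length)
    (st : List (List Int) × List (List (Option String))) (hst : pvInv v w st.1 st.2 (i0 - 1)) :
    ∀ k, k ≤ w.length - 1 →
      pvInnerInv v w i0 (pvInnerF v w i0 st k).1 (pvInnerF v w i0 st k).2 k := by
  intro k
  induction k with
  | zero =>
    intro _
    have h0 : pvInnerF v w i0 st 0 = st := rfl
    rw [h0]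
    obtain ⟨hS, hB, hlow, hhigh⟩ := hst
    refine ⟨hS, hB, fun r j hr hj hlt => hlow r j hr hj (by omega), ?_,
      fun j hj hgt => hhigh i0 j hi2 hj (by omega),
      fun r j hr hj hgt => hhigh r j hr hj (by omega)⟩
    intro j hj hj0
    have : j = 0 := by omega
    subst this
    obtain ⟨hz, hn⟩ := hhigh i0 0 hi2 hj (by omega)
    refine ⟨by rw [hz, pvS_zero], by rw [hn, pvDir, if_pos rfl]⟩
  | succ k ih =>
    intro hk
    obtain ⟨hS, hB, hlow, hrow, hhigh, habove⟩ := ih (by omega)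
    rw [pvInnerF_succ]
    have e2 : (1 : Nat) + k = k + 1 := by omega
    rw [e2]
    set st' := pvInnerF v w i0 st k with hst'
    have hkm : k + 1 < w.length := by omega
    -- the values read by the loop body are the final (ideal) values
    have hr1 : pvGet2 st'.1 0 (i0 - 1) ((k + 1) - 1) = pvS v w (i0 - 1) k := by
      simpa using (hlow (i0 - 1) k (by omega) (by omega) (by omega)).1
    have hr2 : pvGet2 st'.1 0 (i0 - 1) (k + 1) = pvS v w (i0 - 1) (k + 1) :=
      (hlow (i0 - 1) (k + 1) (by omega) hkm (by omega)).1
    have hr3 : pvGet2 st'.1 0 i0 ((k + 1) - 1) = pvS v w i0 k := by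
      simpa using (hrow k (by omega) (le_refl k)).1
    have hbest := pvS_pos v w i0 (k + 1) (by omega) (by omega)
    simp only [Nat.add_sub_cancel] at hbest
    have hstep : pvInnerStep v w i0 st' (k + 1) =
        (pvSet2 st'.1 i0 (k + 1) (pvS v w i0 (k + 1)),
         pvSet2 st'.2 i0 (k + 1) (pvDir v w i0 (k + 1))) := by
      unfold pvInnerStep
      rw [hr1, hr2, hr3, ← hbest]
      have h3 := pv_max3 (pvS v w (i0 - 1) k + (if v.getD i0 ' ' = w.getD (k + 1) ' ' then (1 : Int) else -2))
        (pvS v w (i0 - 1) (k + 1) - 2) (pvS v w i0 k - 2)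
      rw [← hbest] at h3
      rw [pvDir, if_neg (by omega : ¬(k + 1 = 0)), if_neg (by omega : ¬(i0 = 0))]
      simp only [Nat.add_sub_cancel]
      by_cases h1 : pvS v w i0 (k + 1) = pvS v w (i0 - 1) k + (if v.getD i0 ' ' = w.getD (k + 1) ' ' then (1 : Int) else -2)
      · rw [if_pos h1, if_pos h1]
      · rw [if_neg h1, if_neg h1]
        by_cases h2 : pvS v w i0 (k + 1) = pvS v w (i0 - 1) (k + 1) - 2
        · rw [if_pos h2, if_pos h2]
        · rw [if_neg h2, if_neg h2]
          rw [if_pos ((h3.resolve_left h1).resolve_left h2)]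
    rw [hstep]
    have hlen1 : i0 < st'.1.length := by rw [hS.1]; omega
    have hlen2 : i0 < st'.2.length := by rw [hB.1]; omega
    have hrw1 : k + 1 < (st'.1.getD i0 []).length := by rw [hS.2 i0 hi2]; omega
    have hrw2 : k + 1 < (st'.2.getD i0 []).length := by rw [hB.2 i0 hi2]; omega
    refine ⟨pv_shape_set2 _ _ _ _ _ _ hS, pv_shape_set2 _ _ _ _ _ _ hB, ?_, ?_, ?_, ?_⟩
    · intro r j hr hj hlt
      rw [pv_get2_set2_ne _ _ _ _ _ _ _ (Or.inl (by omega)), pv_get2_set2_ne _ _ _ _ _ _ _ (Or.inl (by omega))]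
      exact hlow r j hr hj hlt
    · intro j hj hjk1
      rcases eq_or_ne j (k + 1) with rfl | hne
      · exact ⟨pv_get2_set2_self _ _ _ _ _ hlen1 hrw1, pv_get2_set2_self _ _ _ _ _ hlen2 hrw2⟩
      · rw [pv_get2_set2_ne _ _ _ _ _ _ _ (Or.inr hne), pv_get2_set2_ne _ _ _ _ _ _ _ (Or.inr hne)]
        exact hrow j hj (by omega)
    · intro j hj hgt
      rw [pv_get2_set2_ne _ _ _ _ _ _ _ (Or.inr (by omega)), pv_get2_set2_ne _ _ _ _ _ _ _ (Or.inr (by omega))]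
      exact hhigh j hj (by omega)
    · intro r j hr hj hgt
      rw [pv_get2_set2_ne _ _ _ _ _ _ _ (Or.inl (by omega)), pv_get2_set2_ne _ _ _ _ _ _ _ (Or.inl (by omega))]
      exact habove r j hr hj hgt

theorem pv_outer_fold (v w : List Char) (hv : 0 < v.length) (hw : 0 < w.length) :
    ∀ r, r ≤ v.length - 1 → pvInv v w (pvOuterF v w r).1 (pvOuterF v w r).2 r := by
  intro r
  induction r with
  | zero =>
    intro _
    obtain ⟨hS, hB, hchar, hzero, hrows⟩ := pv_row0_fold v w hv (w.length - 1) (le_refl _)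
    refine ⟨hS, hB, ?_, ?_⟩
    · intro i j hi hj hle
      have : i = 0 := by omega
      subst this
      exact hchar j hj (by omega)
    · intro i j hi hj hgt
      exact hrows i j hi hj (by omega)
  | succ r ih =>
    intro hr
    rw [pvOuterF_succ, (by omega : (1 : Nat) + r = r + 1)]
    have hst : pvInv v w (pvOuterF v w r).1 (pvOuterF v w r).2 ((r + 1) - 1) := by
      simpa using ih (by omega)
    obtain ⟨hS, hB, hlow, hrow, hhigh, habove⟩ :=
      pv_inner_fold v w (r + 1) (by omega) (by omega) (pvOuterF v w r) hst (w.length - 1) (le_refl _)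
    refine ⟨hS, hB, ?_, ?_⟩
    · intro i j hi hj hle
      rcases eq_or_ne i (r + 1) with rfl | hne
      · exact hrow j hj (by omega)
      · exact hlow i j hi hj (by omega)
    · intro i j hi hj hgt
      exact habove i j hi hj hgt

theorem pv_characterization (v w : List Char) (hv : 0 < v.length) (hw : 0 < w.length) :
    pvInv v w (pvA_matrices v w).1 (pvA_matrices v w).2 (v.length - 1) := by
  rw [pvA_matrices_eq]
  exact pv_outer_fold v w hv hw (v.length - 1) (le_refl _)

theorem pvA_loop_eq (v w : List Char) (sc : List (List Int)) (bt : List (List (Option String)))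
    (hinv : pvInv v w sc bt (v.length - 1)) :
    ∀ fuel i j a1 a2, i < v.length → j < w.length → i + j ≤ fuel →
      pvA_loop bt v w fuel i j a1 a2 =
        ((pvRev v w i j).1.reverse ++ a1, (pvRev v w i j).2.reverse ++ a2) := by
  have hbt : ∀ i j, i < v.length → j < w.length → pvGet2 bt none i j = pvDir v w i j :=
    fun i j hi hj => (hinv.2.2.1 i j hi hj (by omega)).2
  intro fuel
  induction fuel with
  | zero =>
    intro i j a1 a2 hi hj hf
    have : i = 0 ∧ j = 0 := by omega
    obtain ⟨rfl, rfl⟩ := this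
    simp [pvA_loop, pvRev_j0]
  | succ fuel ih =>
    intro i j a1 a2 hi hj hf
    rw [pvA_loop, hbt i j hi hj]
    by_cases hj0 : j = 0
    · subst hj0; simp [pvDir, pvRev_j0]
    by_cases hi0 : i = 0
    · subst hi0
      rw [pvDir, if_neg hj0, if_pos rfl]
      simp only [if_neg (by decide : ¬("left" : String) = "diagonal"),
        if_neg (by decide : ¬("left" : String) = "upwards")]
      rw [ih 0 (j - 1) _ _ hi (by omega) (by omega), pvRev_i0 v w j hj0]
      simp
    · rw [pvDir, if_neg hj0, if_neg hi0, pvRev_pos v w i j hi0 hj0]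
      by_cases h1 : pvS v w i j = pvS v w (i - 1) (j - 1) + (if v.getD i ' ' = w.getD j ' ' then (1 : Int) else -2)
      · rw [if_pos h1, if_pos h1]
        simp only [reduceIte]
        rw [ih (i - 1) (j - 1) _ _ (by omega) (by omega) (by omega)]
        simp
      · rw [if_neg h1, if_neg h1]
        by_cases h2 : pvS v w i j = pvS v w (i - 1) j - 2
        · rw [if_pos h2, if_pos h2]
          simp only [if_neg (by decide : ¬("upwards" : String) = "diagonal")]
          rw [ih (i - 1) j _ _ (by omega) hj (by omega)]
          simp
        · rw [if_neg h2, if_neg h2]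
          simp only [if_neg (by decide : ¬("left" : String) = "diagonal"), if_neg (by decide : ¬("left" : String) = "upwards")]
          rw [ih i (j - 1) _ _ hi (by omega) (by omega)]
          simp

-- ==== B-side lemmas ====

-- getD over an append
theorem pv_getD_append_lt {α : Type} (l : List α) (x d : α) (n : Nat) (h : n < l.length) :
    (l ++ [x]).getD n d = l.getD n d := by
  simp [List.getD_eq_getElem?_getD, List.getElem?_append_left h]

theorem pv_getD_append_last {α : Type} (l : List α) (x d : α) :
    (l ++ [x]).getD l.length d = x := by
  simp [List.getD_eq_getElem?_getD]

theorem pv_getD_append_at {α : Type} (l : List α) (x d : α) (n : Nat) (h : l.length = n) :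
    (l ++ [x]).getD n d = x := by
  subst h; exact pv_getD_append_last l x d

-- prefix invariant for B's row-under-construction
def pvBRowInv (v w : List Char) (i : Nat) (row : List (Int × PvChain)) (k : Nat) : Prop :=
  row.length = k + 1 ∧
  ∀ j, j ≤ k → row.getD j (0, PvChain.nil) = (pvS v w i j, pvChainOf v w i j)

-- partial row-0 loop
def pvB_row0F (w : List Char) (k : Nat) : List (Int × PvChain) :=
  (List.range' 1 k).foldl
    (fun row j => row ++ [((row.getD (j - 1) (0, PvChain.nil)).1 - 2,
      PvChain.cons '-' (w.getD j ' ') (row.getD (j - 1) (0, PvChain.nil)).2)])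
    [(0, PvChain.nil)]

theorem pvB_row0_eq (w : List Char) : pvB_row0 w = pvB_row0F w (w.length - 1) := rfl

theorem pvB_row0F_succ (w : List Char) (k : Nat) :
    pvB_row0F w (k + 1) = pvB_row0F w k ++
      [(((pvB_row0F w k).getD ((1 + k) - 1) (0, PvChain.nil)).1 - 2,
        PvChain.cons '-' (w.getD (1 + k) ' ') ((pvB_row0F w k).getD ((1 + k) - 1) (0, PvChain.nil)).2)] := by
  rw [pvB_row0F, pvB_row0F, List.range'_1_concat, List.foldl_append]
  rfl

theorem pvB_row0_fold (v w : List Char) :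
    ∀ k, k ≤ w.length - 1 → pvBRowInv v w 0 (pvB_row0F w k) k := by
  intro k
  induction k with
  | zero =>
    intro _
    refine ⟨rfl, ?_⟩
    intro j hj
    have : j = 0 := by omega
    subst this
    simp [pvB_row0F, pvS_zero, pvChainOf_j0]
  | succ k ih =>
    intro hk
    obtain ⟨hlen, hval⟩ := ih (by omega)
    rw [pvB_row0F_succ]
    have e2 : (1 : Nat) + k = k + 1 := by omega
    rw [e2]
    simp only [Nat.add_sub_cancel]
    rw [hval k (le_refl k)]
    refine ⟨by simp [hlen], ?_⟩
    intro j hj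
    rcases eq_or_ne j (k + 1) with rfl | hne
    · rw [pv_getD_append_at _ _ _ _ hlen,
        pvS_row0 v w (k + 1) (by omega), pvChainOf_i0 v w (k + 1) (by omega)]
      simp
    · rw [pv_getD_append_lt _ _ _ _ (by omega)]
      exact hval j (by omega)

-- full-row invariant (what a completed row satisfies)
def pvBFull (v w : List Char) (i : Nat) (row : List (Int × PvChain)) : Prop :=
  row.length = w.length ∧
  ∀ j, j < w.length → row.getD j (0, PvChain.nil) = (pvS v w i j, pvChainOf v w i j)

theorem pvBRowInv_full (v w : List Char) (i : Nat) (row : List (Int × PvChain))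
    (hw : 0 < w.length) (h : pvBRowInv v w i row (w.length - 1)) : pvBFull v w i row := by
  obtain ⟨hlen, hval⟩ := h
  exact ⟨by omega, fun j hj => hval j (by omega)⟩

-- partial inner loop of the fill
def pvB_innerF (v w : List Char) (row : List (Int × PvChain)) (i k : Nat) : List (Int × PvChain) :=
  (List.range' 1 k).foldl (pvBStep v w row i) [(0, PvChain.nil)]

theorem pvB_innerF_succ (v w : List Char) (row : List (Int × PvChain)) (i k : Nat) :
    pvB_innerF v w row i (k + 1) = pvBStep v w row i (pvB_innerF v w row i k) (1 + k) := by
  rw [pvB_innerF, pvB_innerF, List.range'_1_concat, List.foldl_append]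
  rfl

theorem pvB_inner_fold (v w : List Char) (row : List (Int × PvChain)) (i : Nat)
    (hi1 : 1 ≤ i) (hrow : pvBFull v w (i - 1) row) :
    ∀ k, k ≤ w.length - 1 → pvBRowInv v w i (pvB_innerF v w row i k) k := by
  intro k
  induction k with
  | zero =>
    intro _
    refine ⟨rfl, ?_⟩
    intro j hj
    have : j = 0 := by omega
    subst this
    simp [pvB_innerF, pvS_zero, pvChainOf_j0]
  | succ k ih =>
    intro hk
    obtain ⟨hlen, hval⟩ := ih (by omega)
    rw [pvB_innerF_succ]
    have e2 : (1 : Nat) + k = k + 1 := by omega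
    rw [e2]
    have hkm : k + 1 < w.length := by omega
    set new := pvB_innerF v w row i k with hnew
    have hr1 : row.getD ((k + 1) - 1) (0, PvChain.nil) = (pvS v w (i - 1) k, pvChainOf v w (i - 1) k) := by
      simpa using hrow.2 k (by omega)
    have hr2 : row.getD (k + 1) (0, PvChain.nil) = (pvS v w (i - 1) (k + 1), pvChainOf v w (i - 1) (k + 1)) :=
      hrow.2 (k + 1) hkm
    have hr3 : new.getD ((k + 1) - 1) (0, PvChain.nil) = (pvS v w i k, pvChainOf v w i k) := by
      simpa using hval k (le_refl k)
    have hbest := pvS_pos v w i (k + 1) (by omega) (by omega)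
    simp only [Nat.add_sub_cancel] at hbest
    have hstep : pvBStep v w row i new (k + 1) =
        new ++ [(pvS v w i (k + 1), pvChainOf v w i (k + 1))] := by
      unfold pvBStep
      rw [hr1, hr2, hr3, ← hbest, pvChainOf_pos v w i (k + 1) (by omega) (by omega)]
      simp
    rw [hstep]
    refine ⟨by simp [hlen], ?_⟩
    intro j hj
    rcases eq_or_ne j (k + 1) with rfl | hne
    · rw [pv_getD_append_at _ _ _ _ hlen]
    · rw [pv_getD_append_lt _ _ _ _ (by omega)]
      exact hval j (by omega)

-- partial outer loop of the fill
def pvB_fillF (v w : List Char) (r : Nat) : List (Int × PvChain) :=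
  (List.range' 1 r).foldl
    (fun row i => (List.range' 1 (w.length - 1)).foldl (pvBStep v w row i) [(0, PvChain.nil)])
    (pvB_row0 w)

theorem pvB_fill_eq (v w : List Char) : pvB_fill v w = pvB_fillF v w (v.length - 1) := rfl

theorem pvB_fillF_succ (v w : List Char) (r : Nat) :
    pvB_fillF v w (r + 1) = pvB_innerF v w (pvB_fillF v w r) (1 + r) (w.length - 1) := by
  rw [pvB_fillF, pvB_fillF, List.range'_1_concat, List.foldl_append]
  rfl

theorem pvB_outer_fold (v w : List Char) (hw : 0 < w.length) :
    ∀ r, r ≤ v.length - 1 → pvBFull v w r (pvB_fillF v w r) := by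
  intro r
  induction r with
  | zero =>
    intro _
    exact pvBRowInv_full v w 0 _ hw (by rw [pvB_fillF, pvB_row0_eq]; simpa using pvB_row0_fold v w (w.length - 1) (le_refl _))
  | succ r ih =>
    intro hr
    rw [pvB_fillF_succ, (by omega : (1 : Nat) + r = r + 1)]
    have hprev : pvBFull v w ((r + 1) - 1) (pvB_fillF v w r) := by simpa using ih (by omega)
    exact pvBRowInv_full v w (r + 1) _ hw
      (pvB_inner_fold v w (pvB_fillF v w r) (r + 1) (by omega) hprev (w.length - 1) (le_refl _))

-- unwinding a chain yields its two tracks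
theorem pvB_unwind_eq (ch : PvChain) : ∀ r1 r2,
    pvB_unwind ch r1 r2 = (r1 ++ pvChain1 ch, r2 ++ pvChain2 ch) := by
  induction ch with
  | nil => intro r1 r2; simp [pvB_unwind, pvChain1, pvChain2]
  | cons c1 c2 p ih =>
    intro r1 r2
    rw [pvB_unwind, ih]
    simp [pvChain1, pvChain2]

-- the running-argmax fold, with two keys that agree on the scanned indices
theorem pv_best_congr (f g : Nat → Int) : ∀ (l : List Nat) (b : Nat),
    (∀ x ∈ l, f x = g x) → f b = g b →
    l.foldl (fun b j => if f j > f b then j else b) b =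
      l.foldl (fun b j => if g j > g b then j else b) b := by
  intro l
  induction l with
  | nil => intro b _ _; rfl
  | cons x t ih =>
    intro b hmem hb
    simp only [List.foldl_cons]
    rw [hmem x (by simp), hb]
    split_ifs with h
    · exact ih x (fun y hy => hmem y (by simp [hy])) (hmem x (by simp))
    · exact ih b (fun y hy => hmem y (by simp [hy])) hb

theorem pv_max?_getD (key : Nat → Int) (m : Nat) (hm : 0 < m) :
    (PySem.List.max? (List.range m) key).getD 0 =
      (List.range' 1 (m - 1)).foldl (fun b j => if key j > key b then j else b) 0 := by
  obtain ⟨k, rfl⟩ := Nat.exists_eq_succ_of_ne_zero (by omega : m ≠ 0)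
  have hr : List.range (k + 1) = 0 :: List.range' 1 k := by
    rw [List.range_eq_range', List.range'_succ]
  rw [hr]
  have main : ∀ (l : List Nat) (b : Nat),
      (PySem.List.max? (b :: l) key).getD 0 =
        l.foldl (fun b j => if key j > key b then j else b) b := by
    intro l
    induction l with
    | nil => intro b; rfl
    | cons x t ih =>
      intro b
      have h1 : PySem.List.max? (b :: x :: t) key =
          PySem.List.max? ((if key x > key b then x else b) :: t) key := by
        simp only [PySem.List.max?, List.foldl_cons]
        by_cases h : key b < key x
        · simp [h, gt_iff_lt]
        · simp [h, gt_iff_lt]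
      rw [h1, ih]
      simp only [List.foldl_cons]
  rw [main]
  rfl

-- every index the argmax loop visits or returns stays below m
theorem pv_best_lt (key : Nat → Int) (m : Nat) :
    ∀ (l : List Nat) (b : Nat), b < m → (∀ x ∈ l, x < m) →
      l.foldl (fun b j => if key j > key b then j else b) b < m := by
  intro l
  induction l with
  | nil => intro b hb _; exact hb
  | cons x t ih =>
    intro b hb hmem
    simp only [List.foldl_cons]
    by_cases h : key x > key b
    · rw [if_pos h]; exact ih x (hmem x (by simp)) (fun y hy => hmem y (by simp [hy]))
    · rw [if_neg h]; exact ih b hb (fun y hy => hmem y (by simp [hy]))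

-- ===== VERDICT (by name: the statement is the Claim_ definition above) =====
theorem overlap_alignment_spec : Claim_equal_overlap_alignment := by
  intro s1 s2 _
  show overlap_alignment s1 s2 = overlap_alignment_alt s1 s2
  simp only [overlap_alignment, overlap_alignment_alt]
  set v : List Char := '-' :: s1.toList with hvdef
  set w : List Char := '-' :: s2.toList with hwdef
  have hv : 0 < v.length := by simp [hvdef]
  have hw : 0 < w.length := by simp [hwdef]
  have hcharA := pv_characterization v w hv hw
  have hcharB := pvB_outer_fold v w hw (v.length - 1) (le_refl _)
  rw [← pvB_fill_eq] at hcharB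
  set n := v.length - 1 with hndef
  have hn : n < v.length := by omega
  -- the two argmax computations coincide
  have hmemlt : ∀ x ∈ List.range' 1 (w.length - 1), x < w.length := by
    intro x hx
    have := List.mem_range'_1.mp hx
    omega
  have hkeys : ∀ x ∈ List.range' 1 (w.length - 1),
      pvGet2 (pvA_matrices v w).1 0 n x = ((pvB_fill v w).getD x (0, PvChain.nil)).1 := by
    intro x hx
    rw [(hcharA.2.2.1 n x hn (hmemlt x hx) (le_refl _)).1, hcharB.2 x (hmemlt x hx)]
  have hkey0 : pvGet2 (pvA_matrices v w).1 0 n 0 = ((pvB_fill v w).getD 0 (0, PvChain.nil)).1 := by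
    rw [(hcharA.2.2.1 n 0 hn hw (le_refl _)).1, hcharB.2 0 hw]
  have hbesteq : (PySem.List.max? (List.range w.length) (fun x => pvGet2 (pvA_matrices v w).1 0 n x)).getD 0
      = pvB_best (pvB_fill v w) w.length := by
    rw [pv_max?_getD _ _ hw, pvB_best]
    exact pv_best_congr _ _ _ 0 hkeys hkey0
  set j0 := pvB_best (pvB_fill v w) w.length with hj0def
  have hj0 : j0 < w.length := by
    rw [hj0def, pvB_best]
    exact pv_best_lt _ _ _ 0 hw hmemlt
  rw [hbesteq]
  -- both sides in terms of pvS / pvChainOf at (n, j0)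
  rw [(hcharA.2.2.1 n j0 hn hj0 (le_refl _)).1, hcharB.2 j0 hj0]
  rw [pvA_loop_eq v w (pvA_matrices v w).1 (pvA_matrices v w).2 hcharA
      (v.length + w.length) n j0 [] [] hn hj0 (by omega)]
  rw [pvB_unwind_eq]
  simp [pvRev]
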